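-- pv_equiv track=rewrite | github.com/MrBrantCode/unitest_baseline | mut_generate/mist_train_taco/taco_16932/solution.py | count_beautiful_triplets
-- ===== SOURCE A (Python) =====
-- def count_beautiful_triplets(arr, d):
--     cnt = {}
--     left = []
--
--     # Step 1: Populate the left array with counts of elements that satisfy the first condition (a[j] - a[i] = d)
--     for x in arr:
--         left.append(cnt.get(x - d, 0))
--         if x not in cnt:
--             cnt[x] = 0
--         cnt[x] += 1
--
--     # Step 2: Reverse the left array to align with the reversed sequence
--     left = left[::-1]
--
--     # Step 3: Initialize a new count dictionary for the second condition (a[k] - a[j] = d)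
--     cnt = {}
--     res = 0
--
--     # Step 4: Calculate the number of beautiful triplets
--     for i, x in enumerate(arr[::-1]):
--         res += left[i] * cnt.get(x + d, 0)
--         cnt[x] = cnt.get(x, 0) + 1
--
--     return res
-- ===== SOURCE B (Python) =====
-- def count_beautiful_triplets(arr, d):
--     # one-pass DP: cnt[v] = occurrences of v so far, pair[v] = pairs (i<j) with arr[i]=v-d, arr[j]=v
--     cnt = {}
--     pair = {}
--     res = 0
--     for x in arr:
--         res += pair.get(x - d, 0)
--         pair[x] = pair.get(x, 0) + cnt.get(x - d, 0)
--         cnt[x] = cnt.get(x, 0) + 1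
--     return res
-- ===== Notes on version B (the rewrite author's own statement) =====
-- stated objective: simpler
-- what changed: Replaces A's two-pass scheme (forward pass building a left-count list, reversal, then a backward pass multiplying left counts by right counts) with a single forward DP pass over two dicts that accumulates counts of length-1 and length-2 progressions and completes triplets on the fly.
import Mathlib
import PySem

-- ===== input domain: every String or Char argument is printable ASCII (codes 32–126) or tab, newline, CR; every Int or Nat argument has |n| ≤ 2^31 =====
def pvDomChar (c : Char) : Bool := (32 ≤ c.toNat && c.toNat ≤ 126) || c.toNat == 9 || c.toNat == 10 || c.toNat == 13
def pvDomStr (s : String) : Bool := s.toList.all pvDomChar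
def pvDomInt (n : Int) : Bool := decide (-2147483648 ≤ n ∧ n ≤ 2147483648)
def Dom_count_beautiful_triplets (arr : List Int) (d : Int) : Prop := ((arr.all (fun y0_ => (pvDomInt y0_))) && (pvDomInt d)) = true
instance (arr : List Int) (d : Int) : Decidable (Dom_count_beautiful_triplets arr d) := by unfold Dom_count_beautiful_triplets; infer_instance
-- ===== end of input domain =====

-- B replaces A's two passes (forward `left` counts, then a backward product pass) by ONE forward DP pass
-- accumulating counts of length-1 and length-2 progressions; objective: simpler (one loop, no reversal).

-- ===== PORT A =====
-- literal port of A: pass 1 builds `left`, reverse it, pass 2 over enumerate(arr[::-1]).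
-- `left[i]` is ported as pyGetD with default 0: i < left.length on every iteration, so it is exact;
-- xs[::-1] via slice? never raises (step = -1 ≠ 0), so `.getD []` is exact too.
def count_beautiful_triplets (arr : List Int) (d : Int) : Int :=
  let s1 := arr.foldl (fun (st : PySem.Dict Int Int × List Int) x =>
      let left := st.2 ++ [st.1.getD (x - d) 0]
      let cnt := if st.1.contains x then st.1 else st.1.insert x 0
      let cnt := cnt.insert x (cnt.getD x 0 + 1)
      (cnt, left)) (PySem.Dict.empty, [])
  let left := (PySem.List.slice? s1.2 none none (-1)).getD []
  let s2 := (PySem.List.enumerate ((PySem.List.slice? arr none none (-1)).getD []) 0).foldl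
      (fun (st : PySem.Dict Int Int × Int) p =>
        let res := st.2 + (PySem.List.pyGetD left p.1 0) * st.1.getD (p.2 + d) 0
        let cnt := st.1.insert p.2 (st.1.getD p.2 0 + 1)
        (cnt, res)) (PySem.Dict.empty, 0)
  s2.2

-- ===== PORT B =====
def count_beautiful_triplets_alt (arr : List Int) (d : Int) : Int :=
  (arr.foldl (fun (st : PySem.Dict Int Int × PySem.Dict Int Int × Int) x =>
      let res := st.2.2 + st.2.1.getD (x - d) 0
      let pair := st.2.1.insert x (st.2.1.getD x 0 + st.1.getD (x - d) 0)
      let cnt := st.1.insert x (st.1.getD x 0 + 1)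
      (cnt, pair, res)) (PySem.Dict.empty, PySem.Dict.empty, 0)).2.2

-- ===== PRECONDITION & SPEC =====
def Spec_count_beautiful_triplets (arr : List Int) (d : Int) (out : Int) : Prop := out = count_beautiful_triplets_alt arr d
instance (arr : List Int) (d : Int) (out : Int) : Decidable (Spec_count_beautiful_triplets arr d out) := by unfold Spec_count_beautiful_triplets; infer_instance

-- ===== CLAIM (what is proved, stated in full; the proofs are below) =====
def Claim_equal_count_beautiful_triplets : Prop := ∀ (arr : List Int) (d : Int), Dom_count_beautiful_triplets arr d → Spec_count_beautiful_triplets arr d (count_beautiful_triplets arr d)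

-- ===== LEMMAS AND PROOFS =====

-- Int-valued occurrence count of v in a list
def cI : List Int → Int → Int
  | [], _ => 0
  | y :: ys, v => (if y = v then 1 else 0) + cI ys v

-- Qg d pre ys v: sum over positions j of ys with ys_j = v of the count of v-d strictly before j
-- (pre = elements before ys, newest first)
def Qg (d : Int) : List Int → List Int → Int → Int
  | _, [], _ => 0
  | pre, y :: ys, v => (if y = v then cI pre (v - d) else 0) + Qg d (y :: pre) ys v

-- number of triplets i<j<k with a_j - a_i = d and a_k - a_j = d
def T3 (d : Int) : List Int → Int
  | [] => 0
  | y :: ys => T3 d ys + Qg d [] ys (y + 2 * d)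

-- the `left` list of A (pre = reversed processed prefix)
def Lspec (d : Int) : List Int → List Int → List Int
  | _, [] => []
  | pre, x :: xs => cI pre (x - d) :: Lspec d (x :: pre) xs

-- A's second loop, on the zipped (left,value) list, pre2 = reversed processed prefix of that loop
def Sspec (d : Int) : List (Int × Int) → List Int → Int
  | [], _ => 0
  | (l, x) :: ps, pre2 => l * cI pre2 (x + d) + Sspec d ps (x :: pre2)

-- Wspec d pre ys pre2 = Σ over elements y of ys of (count of y-d before it, incl. pre) * (count of y+d in pre2)
def Wspec (d : Int) : List Int → List Int → List Int → Int
  | _, [], _ => 0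
  | pre, y :: ys, pre2 => cI pre (y - d) * cI pre2 (y + d) + Wspec d (y :: pre) ys pre2

-- pair-dict semantics of B: pairs (i<j) in the processed prefix (pre = reversed prefix) with a_i = v-d, a_j = v
def P (d : Int) : List Int → Int → Int
  | [], _ => 0
  | x :: pre, v => P d pre v + (if x = v then cI pre (v - d) else 0)

-- res semantics of B over the reversed processed prefix
def R (d : Int) : List Int → Int
  | [] => 0
  | x :: pre => R d pre + P d pre (x - d)

theorem cI_append (a b : List Int) (v : Int) : cI (a ++ b) v = cI a v + cI b v := by
  induction a with
  | nil => simp [cI]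
  | cons y ys ih => simp [cI, ih]; ring

theorem cI_reverse (a : List Int) (v : Int) : cI a.reverse v = cI a v := by
  induction a with
  | nil => rfl
  | cons y ys ih => simp [cI, List.reverse_cons, cI_append, ih]; ring

theorem Qg_append (d : Int) (p : List Int) (x v : Int) :
    ∀ pre, Qg d pre (p ++ [x]) v = Qg d pre p v + (if x = v then cI (p.reverse ++ pre) (v - d) else 0) := by
  induction p with
  | nil => intro pre; simp [Qg]
  | cons y ys ih =>
      intro pre
      simp only [List.cons_append, Qg, ih (y :: pre), List.reverse_cons, List.append_assoc,
        List.cons_append, List.nil_append]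
      ring

theorem Qg_pre (d : Int) (p : List Int) (v : Int) :
    ∀ pre, Qg d pre p v = Qg d [] p v + cI p v * cI pre (v - d) := by
  induction p with
  | nil => intro pre; simp [Qg, cI]
  | cons y ys ih =>
      intro pre
      simp only [Qg, ih (y :: pre), ih [y], cI, add_zero]
      split_ifs <;> ring

theorem T3_append (d : Int) (p : List Int) (x : Int) :
    T3 d (p ++ [x]) = T3 d p + Qg d [] p (x - d) := by
  induction p with
  | nil => simp [T3, Qg]
  | cons y ys ih =>
      simp only [List.cons_append, T3, ih, Qg_append, List.append_nil, Qg,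
        Qg_pre d ys (x - d) [y], cI, add_zero]
      by_cases hx : x = y + 2 * d
      · have hy : y = x - d - d := by omega
        have h2 : y + 2 * d - d = x - d := by omega
        simp only [if_pos hx, if_pos hy, ite_self, cI_reverse, mul_one, zero_add, h2]
        ring
      · have hy : ¬ (y = x - d - d) := by omega
        simp only [if_neg hx, if_neg hy, ite_self, add_zero, mul_zero, zero_add]
        ring

theorem length_Lspec (d : Int) (ys : List Int) : ∀ pre, (Lspec d pre ys).length = ys.length := by
  induction ys with
  | nil => intro pre; rfl
  | cons x xs ih => intro pre; simp [Lspec, ih]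

theorem Lspec_append (d : Int) (ys : List Int) (x : Int) :
    ∀ pre, Lspec d pre (ys ++ [x]) = Lspec d pre ys ++ [cI (ys.reverse ++ pre) (x - d)] := by
  induction ys with
  | nil => intro pre; simp [Lspec]
  | cons y t ih =>
      intro pre
      simp only [List.cons_append, Lspec, ih (y :: pre), List.reverse_cons, List.append_assoc,
        List.cons_append, List.nil_append]

theorem Wspec_append (d : Int) (ys : List Int) (x : Int) (pre2 : List Int) :
    ∀ pre, Wspec d pre (ys ++ [x]) pre2 = Wspec d pre ys pre2 + cI (ys.reverse ++ pre) (x - d) * cI pre2 (x + d) := by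
  induction ys with
  | nil => intro pre; simp [Wspec]
  | cons y t ih =>
      intro pre
      simp only [List.cons_append, Wspec, ih (y :: pre), List.reverse_cons, List.append_assoc,
        List.cons_append, List.nil_append]
      ring

theorem Wspec_ext (d : Int) (ys : List Int) (x : Int) (pre2 : List Int) :
    ∀ pre, Wspec d pre ys (x :: pre2) = Wspec d pre ys pre2 + Qg d pre ys (x - d) := by
  induction ys with
  | nil => intro pre; simp [Wspec, Qg]
  | cons y t ih =>
      intro pre
      simp only [Wspec, Qg, ih (y :: pre), cI]
      by_cases h : x = y + d
      · have hy : y = x - d := by omega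
        have hxd : x - d - d = y - d := by omega
        rw [if_pos h, if_pos hy, hxd]
        ring
      · have hy : ¬ (y = x - d) := by omega
        rw [if_neg h, if_neg hy]
        ring

theorem Wspec_nil2 (d : Int) (ys : List Int) : ∀ pre, Wspec d pre ys [] = 0 := by
  induction ys with
  | nil => intro pre; rfl
  | cons y t ih => intro pre; simp [Wspec, cI, ih]

-- the bridge between A's reversed-product pass and the triplet count
theorem bridge (d : Int) (ys : List Int) :
    ∀ pre2, Sspec d (((Lspec d [] ys).reverse).zip ys.reverse) pre2 = T3 d ys + Wspec d [] ys pre2 := by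
  induction ys using List.reverseRecOn with
  | nil => intro pre2; simp [Lspec, Sspec, T3, Wspec]
  | append_singleton ys x ih =>
      intro pre2
      rw [Lspec_append d ys x []]
      simp only [List.reverse_append, List.reverse_cons, List.reverse_nil, List.nil_append,
        List.cons_append, List.zip_cons_cons, Sspec]
      rw [ih (x :: pre2), Wspec_ext d ys x pre2 [], T3_append, Wspec_append d ys x pre2 []]
      ring

-- P equals Qg on the reversed prefix
theorem P_eq_Qg (d : Int) (p : List Int) (v : Int) : P d p v = Qg d [] p.reverse v := by
  induction p with
  | nil => rfl
  | cons x t ih => simp [P, List.reverse_cons, Qg_append, ih]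

-- R equals T3 on the reversed prefix
theorem R_eq_T3 (d : Int) (p : List Int) : R d p = T3 d p.reverse := by
  induction p with
  | nil => rfl
  | cons x t ih => simp [R, List.reverse_cons, T3_append, ih, P_eq_Qg]

-- dict update of a counter: getD after `cnt[x] = cnt.get(x,0)+1`
theorem counter_step (cnt : PySem.Dict Int Int) (x : Int) (pre : List Int)
    (h : ∀ v, cnt.getD v 0 = cI pre v) :
    ∀ v, (cnt.insert x (cnt.getD x 0 + 1)).getD v 0 = cI (x :: pre) v := by
  intro v
  rw [PySem.Dict.getD_insert]
  by_cases hv : v = x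
  · subst hv
    rw [if_pos rfl, h, cI, if_pos rfl]
    ring
  · rw [if_neg hv, h, cI, if_neg (show ¬ x = v by omega), zero_add]

-- A's first-pass dict update (the `if x not in cnt` dance) is the same counter step
theorem counterA_step (cnt : PySem.Dict Int Int) (x : Int) (pre : List Int)
    (h : ∀ v, cnt.getD v 0 = cI pre v) :
    ∀ v, (((if cnt.contains x then cnt else cnt.insert x 0)).insert x
        ((if cnt.contains x then cnt else cnt.insert x 0).getD x 0 + 1)).getD v 0 = cI (x :: pre) v := by
  intro v
  by_cases hc : cnt.contains x
  · simp only [hc, if_true]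
    exact counter_step cnt x pre h v
  · simp only [hc, if_false, Bool.false_eq_true]
    rw [PySem.Dict.getD_insert]
    have hx0 : (cnt.insert x 0).getD x 0 = 0 := by rw [PySem.Dict.getD_insert]; simp
    by_cases hv : v = x
    · subst hv
      have h0 : cI pre v = 0 := by
        rw [← h v, PySem.Dict.getD_eq_get?_getD]
        have : cnt.get? v = none := by
          rw [PySem.Dict.get?_eq_none_iff_contains]
          simpa using hc
        rw [this]; rfl
      rw [if_pos rfl, hx0, cI, if_pos rfl, h0]
      norm_num
    · rw [if_neg hv, PySem.Dict.getD_insert, if_neg hv, h, cI,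
        if_neg (show ¬ x = v by omega), zero_add]

-- A's first pass produces Lspec
theorem pass1 (d : Int) (xs : List Int) :
    ∀ (pre : List Int) (cnt : PySem.Dict Int Int) (acc : List Int),
      (∀ v, cnt.getD v 0 = cI pre v) →
      (xs.foldl (fun (st : PySem.Dict Int Int × List Int) x =>
        let left := st.2 ++ [st.1.getD (x - d) 0]
        let cnt := if st.1.contains x then st.1 else st.1.insert x 0
        let cnt := cnt.insert x (cnt.getD x 0 + 1)
        (cnt, left)) (cnt, acc)).2 = acc ++ Lspec d pre xs := by
  induction xs with
  | nil => intro pre cnt acc h; simp [Lspec]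
  | cons x t ih =>
      intro pre cnt acc h
      simp only [List.foldl_cons]
      rw [ih (x :: pre) _ _ (counterA_step cnt x pre h)]
      simp [Lspec, h, List.append_assoc]

-- A's second loop over enumerate + indexing = loop over the zip
theorem enum_zip (d : Int) (l : List Int) :
    ∀ (r : List Int) (k : Nat) (st : PySem.Dict Int Int × Int), l.length = k + r.length →
    (PySem.List.enumerate r (k : Int)).foldl
        (fun st p => (st.1.insert p.2 (st.1.getD p.2 0 + 1),
          st.2 + (PySem.List.pyGetD l p.1 0) * st.1.getD (p.2 + d) 0)) st
      = ((l.drop k).zip r).foldl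
        (fun st q => (st.1.insert q.2 (st.1.getD q.2 0 + 1),
          st.2 + q.1 * st.1.getD (q.2 + d) 0)) st := by
  intro r
  induction r with
  | nil => intro k st h; simp [PySem.List.enumerate_nil]
  | cons x t ih =>
      intro k st h
      have hk : k < l.length := by simp at h; omega
      rw [PySem.List.enumerate_cons, List.foldl_cons]
      have hidx : PySem.List.pyGetD l (k : Int) 0 = l[k] := PySem.List.pyGetD_ofNat l k 0 hk
      have hdrop : l.drop k = l[k] :: l.drop (k + 1) := List.drop_eq_getElem_cons hk
      rw [hdrop, List.zip_cons_cons, List.foldl_cons, hidx]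
      have hc : ((k : Int) + 1) = ((k + 1 : Nat) : Int) := by push_cast; ring
      rw [hc, ih (k + 1) _ (by simp at h ⊢; omega)]

-- A's second loop result = Sspec
theorem pass2 (d : Int) (ps : List (Int × Int)) :
    ∀ (pre2 : List Int) (cnt : PySem.Dict Int Int) (res : Int),
      (∀ v, cnt.getD v 0 = cI pre2 v) →
      (ps.foldl (fun (st : PySem.Dict Int Int × Int) q =>
          (st.1.insert q.2 (st.1.getD q.2 0 + 1), st.2 + q.1 * st.1.getD (q.2 + d) 0)) (cnt, res)).2
        = res + Sspec d ps pre2 := by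
  induction ps with
  | nil => intro pre2 cnt res h; simp [Sspec]
  | cons q t ih =>
      intro pre2 cnt res h
      obtain ⟨l, x⟩ := q
      simp only [List.foldl_cons]
      rw [ih (x :: pre2) _ _ (counter_step cnt x pre2 h)]
      simp [Sspec, h]
      ring

-- B's loop invariant
theorem loopB (d : Int) (xs : List Int) :
    ∀ (pre : List Int) (cnt pair : PySem.Dict Int Int) (res : Int),
      (∀ v, cnt.getD v 0 = cI pre v) →
      (∀ v, pair.getD v 0 = P d pre v) →
      res = R d pre →
      (xs.foldl (fun (st : PySem.Dict Int Int × PySem.Dict Int Int × Int) x =>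
          let res := st.2.2 + st.2.1.getD (x - d) 0
          let pair := st.2.1.insert x (st.2.1.getD x 0 + st.1.getD (x - d) 0)
          let cnt := st.1.insert x (st.1.getD x 0 + 1)
          (cnt, pair, res)) (cnt, pair, res)).2.2 = R d (xs.reverse ++ pre) := by
  induction xs with
  | nil => intro pre cnt pair res h1 h2 h3; simpa using h3
  | cons x t ih =>
      intro pre cnt pair res h1 h2 h3
      simp only [List.foldl_cons]
      rw [List.reverse_cons, List.append_assoc, List.cons_append, List.nil_append]
      apply ih (x :: pre)
      · exact counter_step cnt x pre h1
      · intro v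
        rw [PySem.Dict.getD_insert]
        by_cases hv : v = x
        · subst hv
          rw [if_pos rfl, h1, h2, P, if_pos rfl]
        · rw [if_neg hv, h2, P, if_neg (show ¬ x = v by omega), add_zero]
      · simp [R, h2, h3]

-- A computes T3
theorem A_eq_T3 (arr : List Int) (d : Int) : count_beautiful_triplets arr d = T3 d arr := by
  unfold count_beautiful_triplets
  simp only [PySem.List.slice?_none_none_neg_one, Option.getD_some]
  rw [pass1 d arr [] PySem.Dict.empty [] (by intro v; simp [cI])]
  rw [List.nil_append]
  have hez := enum_zip d ((Lspec d [] arr).reverse) arr.reverse 0 (PySem.Dict.empty, 0)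
    (by simp [length_Lspec])
  norm_num at hez
  rw [hez]
  rw [pass2 d _ [] PySem.Dict.empty 0 (by intro v; simp [cI])]
  rw [bridge d arr []]
  simp [Wspec_nil2]

-- B computes T3
theorem B_eq_T3 (arr : List Int) (d : Int) : count_beautiful_triplets_alt arr d = T3 d arr := by
  unfold count_beautiful_triplets_alt
  rw [loopB d arr [] PySem.Dict.empty PySem.Dict.empty 0
    (by intro v; simp [cI]) (by intro v; simp [P]) rfl]
  rw [List.append_nil, R_eq_T3, List.reverse_reverse]

-- ===== VERDICT (by name: the statement is the Claim_ definition above) =====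
theorem count_beautiful_triplets_spec : Claim_equal_count_beautiful_triplets := by
  intro arr d _
  unfold Spec_count_beautiful_triplets
  rw [A_eq_T3, B_eq_T3]
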